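-- pv_equiv track=rewrite | github.com/ldgeorge85/Legba | src/legba/ui/routes/api_v2.py | _detect_cycle_type
-- ===== SOURCE A (Python) =====
-- _CYCLE_TYPE_KEYWORDS = {
--     "evolve": "EVOLVE",
--     "introspection": "INTROSPECTION",
--     "synthesize": "SYNTHESIZE",
--     "analysis": "ANALYSIS",
--     "analyze": "ANALYSIS",
--     "research": "RESEARCH",
--     "curate": "CURATE",
--     "survey": "SURVEY",
--     "acquire": "ACQUIRE",
-- }
--
-- def _detect_cycle_type(phase_names: list[str]) -> str:
--     """Detect cycle type from phase event names."""
--     priority = ["EVOLVE", "INTROSPECTION", "SYNTHESIZE", "ANALYSIS", "RESEARCH", "CURATE", "SURVEY", "ACQUIRE"]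
--     detected = set()
--     for name in phase_names:
--         lower = name.lower()
--         for keyword, ctype in _CYCLE_TYPE_KEYWORDS.items():
--             if keyword in lower:
--                 detected.add(ctype)
--     for p in priority:
--         if p in detected:
--             return p
--     return "SURVEY"
-- ===== SOURCE B (Python) =====
-- _CYCLE_TYPE_KEYWORDS = {
--     "evolve": "EVOLVE",
--     "introspection": "INTROSPECTION",
--     "synthesize": "SYNTHESIZE",
--     "analysis": "ANALYSIS",
--     "analyze": "ANALYSIS",
--     "research": "RESEARCH",
--     "curate": "CURATE",
--     "survey": "SURVEY",
--     "acquire": "ACQUIRE",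
-- }
--
--
-- def _detect_cycle_type(phase_names: list[str]) -> str:
--     """Detect cycle type: first priority level with any matching phase name."""
--     priority = ["EVOLVE", "INTROSPECTION", "SYNTHESIZE", "ANALYSIS", "RESEARCH", "CURATE", "SURVEY", "ACQUIRE"]
--     for p in priority:
--         for name in phase_names:
--             lower = name.lower()
--             if any(ctype == p and keyword in lower
--                    for keyword, ctype in _CYCLE_TYPE_KEYWORDS.items()):
--                 return p
--     return "SURVEY"
-- ===== Notes on version B (the rewrite author's own statement) =====
-- stated objective: alternative
-- what changed: B inverts the nesting: instead of collecting a set of all detected types and then filtering it by priority, B drives the traversal by the priority list and returns the first priority level for which any phase name contains a keyword of that type, maintaining no set at all.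
import Mathlib
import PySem

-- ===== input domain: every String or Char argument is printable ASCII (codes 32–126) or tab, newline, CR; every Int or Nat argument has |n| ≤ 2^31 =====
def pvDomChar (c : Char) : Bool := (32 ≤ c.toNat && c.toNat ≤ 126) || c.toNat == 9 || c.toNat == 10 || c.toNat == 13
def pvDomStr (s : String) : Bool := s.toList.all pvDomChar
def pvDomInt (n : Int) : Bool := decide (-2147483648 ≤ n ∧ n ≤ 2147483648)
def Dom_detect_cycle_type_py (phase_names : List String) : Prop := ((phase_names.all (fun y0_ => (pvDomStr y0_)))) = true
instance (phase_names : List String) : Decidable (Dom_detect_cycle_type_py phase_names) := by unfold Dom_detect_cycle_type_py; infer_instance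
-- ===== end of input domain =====

-- B replaces A's collect-a-set-then-filter-by-priority with a priority-driven scan that
-- returns the first priority level any phase name matches (objective: alternative).

-- ===== PORT A =====
-- module constant _CYCLE_TYPE_KEYWORDS, as an insertion-ordered association list
def pvCycleKeywords : List (String × String) :=
  [("evolve", "EVOLVE"), ("introspection", "INTROSPECTION"), ("synthesize", "SYNTHESIZE"),
   ("analysis", "ANALYSIS"), ("analyze", "ANALYSIS"), ("research", "RESEARCH"),
   ("curate", "CURATE"), ("survey", "SURVEY"), ("acquire", "ACQUIRE")]

def pvPriority : List String :=
  ["EVOLVE", "INTROSPECTION", "SYNTHESIZE", "ANALYSIS", "RESEARCH", "CURATE", "SURVEY", "ACQUIRE"]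

def detect_cycle_type_py (phase_names : List String) : String :=
  -- detected = set(); for name …: for keyword, ctype …: if keyword in lower: detected.add(ctype)
  let detected : PySem.Set String :=
    phase_names.foldl (fun s name =>
      let lower := PySem.Str.lower name
      pvCycleKeywords.foldl (fun s kv =>
        if PySem.Str.isIn kv.1 lower then PySem.Set.add s kv.2 else s) s)
      PySem.Set.empty
  -- for p in priority: if p in detected: return p
  match pvPriority.find? (fun p => PySem.Set.contains detected p) with
  | some p => p
  | none => "SURVEY"

-- ===== PORT B =====
def pvMatchesPriority (p : String) (phase_names : List String) : Bool :=
  phase_names.any (fun name =>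
    let lower := PySem.Str.lower name
    pvCycleKeywords.any (fun kv => kv.2 == p && PySem.Str.isIn kv.1 lower))

def detect_cycle_type_py_alt (phase_names : List String) : String :=
  match pvPriority.find? (fun p => pvMatchesPriority p phase_names) with
  | some p => p
  | none => "SURVEY"

-- ===== PRECONDITION & SPEC =====
def Spec_detect_cycle_type_py (phase_names : List String) (out : String) : Prop := out = detect_cycle_type_py_alt phase_names
instance (phase_names : List String) (out : String) : Decidable (Spec_detect_cycle_type_py phase_names out) := by unfold Spec_detect_cycle_type_py; infer_instance

-- ===== CLAIM (what is proved, stated in full; the proofs are below) =====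
def Claim_equal_detect_cycle_type_py : Prop := ∀ (phase_names : List String), Dom_detect_cycle_type_py phase_names → Spec_detect_cycle_type_py phase_names (detect_cycle_type_py phase_names)

-- ===== LEMMAS AND PROOFS =====

-- membership in the inner keyword fold of A
theorem pv_mem_inner_fold (kws : List (String × String)) (c : String × String → Bool)
    (s : PySem.Set String) (x : String) :
    x ∈ kws.foldl (fun s kv => if c kv then PySem.Set.add s kv.2 else s) s ↔
      x ∈ s ∨ ∃ kv ∈ kws, c kv = true ∧ kv.2 = x := by
  induction kws generalizing s with
  | nil => simp
  | cons kv rest ih =>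
    simp only [List.foldl_cons, ih, List.mem_cons]
    by_cases h : c kv = true
    · simp [h, PySem.Set.mem_add]
      tauto
    · simp only [h]
      simp only [Bool.not_eq_true] at h
      constructor
      · rintro (hx | ⟨kv', hkv', hc, he⟩)
        · exact Or.inl hx
        · exact Or.inr ⟨kv', Or.inr hkv', hc, he⟩
      · rintro (hx | ⟨kv', (rfl | hkv'), hc, he⟩)
        · exact Or.inl hx
        · rw [h] at hc; cases hc
        · exact Or.inr ⟨kv', hkv', hc, he⟩

-- membership in A's detected set ↔ B's match predicate
theorem pv_mem_detected (phase_names : List String) (s : PySem.Set String) (x : String) :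
    x ∈ phase_names.foldl (fun s name =>
        let lower := PySem.Str.lower name
        pvCycleKeywords.foldl (fun s kv =>
          if PySem.Str.isIn kv.1 lower then PySem.Set.add s kv.2 else s) s) s ↔
      x ∈ s ∨ pvMatchesPriority x phase_names = true := by
  induction phase_names generalizing s with
  | nil => simp [pvMatchesPriority]
  | cons name rest ih =>
    simp only [List.foldl_cons, ih, pv_mem_inner_fold]
    simp only [pvMatchesPriority, List.any_cons, List.any_eq_true, Bool.or_eq_true,
      Bool.and_eq_true, beq_iff_eq]
    constructor
    · rintro ((hx | ⟨kv, hkv, hc, he⟩) | hr)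
      · exact Or.inl hx
      · exact Or.inr (Or.inl ⟨kv, hkv, he, hc⟩)
      · exact Or.inr (Or.inr hr)
    · rintro (hx | ⟨kv, hkv, he, hc⟩ | hr)
      · exact Or.inl (Or.inl hx)
      · exact Or.inl (Or.inr ⟨kv, hkv, hc, he⟩)
      · exact Or.inr hr

-- ===== VERDICT (by name: the statement is the Claim_ definition above) =====
theorem detect_cycle_type_py_spec : Claim_equal_detect_cycle_type_py := by
  intro phase_names _
  unfold Spec_detect_cycle_type_py detect_cycle_type_py detect_cycle_type_py_alt
  have hpred : (fun p => PySem.Set.contains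
      (phase_names.foldl (fun s name =>
        let lower := PySem.Str.lower name
        pvCycleKeywords.foldl (fun s kv =>
          if PySem.Str.isIn kv.1 lower then PySem.Set.add s kv.2 else s) s)
        PySem.Set.empty) p)
      = (fun p => pvMatchesPriority p phase_names) := by
    funext p
    rcases h : pvMatchesPriority p phase_names with _ | _
    · rw [Bool.eq_false_iff]
      intro hc
      have := (PySem.Set.contains_iff _ _).mp hc
      rw [pv_mem_detected] at this
      rcases this with h' | h'
      · simp [PySem.Set.empty] at h'
      · rw [h] at h'; cases h'
    · exact (PySem.Set.contains_iff _ _).mpr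
        ((pv_mem_detected phase_names PySem.Set.empty p).mpr (Or.inr h))
  simp only [hpred]
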